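-- pv_equiv track=rewrite | github.com/wangzitian0/my_finance | data/stage_99_build/sec_recall_examples/implementation_example.py | _extract_filing_date
-- ===== SOURCE A (Python) =====
-- def _extract_filing_date(source_document: str) -> str:
--     """Extract filing date from document name."""
--     # Example: AAPL_sec_edgar_10k_250810-005935_0000320193-24-000123.txt
--     try:
--         # Look for YYYYMMDD pattern in filename
--         parts = source_document.split("_")
--         for part in parts:
--             if len(part) >= 8 and part[:6].isdigit():
--                 date_str = part[:8]
--                 if date_str.startswith("20"):
--                     return f"{date_str[:4]}-{date_str[4:6]}-{date_str[6:8]}"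
--     except:
--         pass
--     return "Unknown"
-- ===== SOURCE B (Python) =====
-- import re
--
-- _DATE_RE = re.compile(r"(?:^|_)(20\d{6})")
--
-- def _extract_filing_date(source_document: str) -> str:
--     """Extract filing date from document name."""
--     match = _DATE_RE.search(source_document)
--     if match:
--         date = match.group(1)
--         return f"{date[:4]}-{date[4:6]}-{date[6:8]}"
--     return "Unknown"
-- ===== Notes on version B (the rewrite author's own statement) =====
-- stated objective: idiomatic
-- what changed: Replaced the split('_')-and-loop-over-parts scan by a single compiled-regex search for an underscore-anchored 8-digit date (re.search of r'(?:^|_)(20\d{6})') whose captured group is formatted directly.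
-- intended difference: On strings whose first underscore-delimited part passing A's per-part test (length at least 8, digit pair 2 0 then four more digits) lacks digits at positions 6-7, A returns a malformed ten-character date containing those two unchecked characters, while B returns a proper all-digit date from a later part or the Unknown sentinel; a filing date must be all digits, so B's value is the intended one. — e.g. on _extract_filing_date("202401ab"): A returns "2024-01-ab", B returns "Unknown"
import Mathlib
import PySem

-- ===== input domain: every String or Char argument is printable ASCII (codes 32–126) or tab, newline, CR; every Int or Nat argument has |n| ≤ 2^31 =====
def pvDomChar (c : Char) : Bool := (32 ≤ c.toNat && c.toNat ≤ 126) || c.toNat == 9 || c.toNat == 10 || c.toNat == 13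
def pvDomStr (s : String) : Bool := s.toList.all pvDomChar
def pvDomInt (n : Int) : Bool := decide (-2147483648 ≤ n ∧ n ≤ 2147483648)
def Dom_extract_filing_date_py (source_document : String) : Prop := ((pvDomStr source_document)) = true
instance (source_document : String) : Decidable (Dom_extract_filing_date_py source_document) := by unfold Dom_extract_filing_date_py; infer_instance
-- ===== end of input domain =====

-- B replaces A's split-into-parts loop by a single regex search for an underscore-anchored
-- 8-digit date (re.search of '(?:^|_)(20\d{6})'); A's unchecked characters 6-7 make it differ
-- on the D_ region below, where B's all-digit date (or 'Unknown') is the intended value.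

-- ===== PORT A =====
-- f"{date_str[:4]}-{date_str[4:6]}-{date_str[6:8]}"
def pvFmt (date_str : List Char) : String :=
  String.mk (PySem.Chars.slice date_str none (some 4) ++ ['-'] ++
             PySem.Chars.slice date_str (some 4) (some 6) ++ ['-'] ++
             PySem.Chars.slice date_str (some 6) (some 8))

-- the 'for part in parts' loop (early return = stopping the fold)
def pvALoop : List (List Char) → String
  | [] => "Unknown"
  | part :: rest =>
      if 8 ≤ part.length ∧ PySem.Chars.strIsdigit (PySem.Chars.slice part none (some 6)) = true then
        let date_str := PySem.Chars.slice part none (some 8)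
        if PySem.Chars.startswith date_str ['2', '0'] = true then pvFmt date_str
        else pvALoop rest
      else pvALoop rest

def extract_filing_date_py (source_document : String) : String :=
  pvALoop (PySem.Chars.splitOn source_document.toList ['_'])

-- ===== PORT B =====
-- Hand port of matching the regex body '(20\d{6})' at the head of cs
-- (exact: the fixed sequence of single-character tests, group rebuilt as in Source B's f-string).
def pvMatch8 (cs : List Char) : Option String :=
  match cs with
  | c0 :: c1 :: d1 :: d2 :: d3 :: d4 :: d5 :: d6 :: _ =>
      if c0 = '2' ∧ c1 = '0' ∧ PySem.Chars.isdigit d1 = true ∧ PySem.Chars.isdigit d2 = true ∧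
         PySem.Chars.isdigit d3 = true ∧ PySem.Chars.isdigit d4 = true ∧
         PySem.Chars.isdigit d5 = true ∧ PySem.Chars.isdigit d6 = true then
        some (String.mk [c0, c1, d1, d2, '-', d3, d4, '-', d5, d6])
      else none
  | _ => none

-- Hand port of re.search's left-to-right scan for the '_'-anchored alternative of '(?:^|_)…'
def pvScan : List Char → Option String
  | [] => none
  | c :: rest =>
      if c = '_' then
        match pvMatch8 rest with
        | some r => some r
        | none => pvScan rest
      else pvScan rest

def extract_filing_date_py_alt (source_document : String) : String :=
  match pvMatch8 source_document.toList with      -- the '^' alternative of the anchor, tried first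
  | some r => r
  | none =>
      match pvScan source_document.toList with
      | some r => r
      | none => "Unknown"

-- ===== PRECONDITION & SPEC =====
-- On strings whose first underscore-delimited part passing A's per-part test (length at least 8,
-- digit pair 2 0 then four more digits) lacks digits at positions 6-7, A returns a malformed
-- ten-character date containing those two unchecked characters, while B returns a proper all-digit
-- date from a later part or the Unknown sentinel, which is the intended value for a filing date.
def D_extract_filing_date_py (source_document : String) : Prop :=
  let f := fun n => (source_document.toList.splitOn '_').find? fun p =>
    decide (p.take 2 = ['2', '0'] ∧ 8 ≤ p.length) && (p.take n).all PySem.Chars.isdigit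
  f 6 ≠ f 8
instance (source_document : String) : Decidable (D_extract_filing_date_py source_document) := by
  unfold D_extract_filing_date_py; infer_instance

def Spec_extract_filing_date_py (source_document : String) (out : String) : Prop :=
  ¬ D_extract_filing_date_py source_document → out = extract_filing_date_py_alt source_document
instance (source_document : String) (out : String) : Decidable (Spec_extract_filing_date_py source_document out) := by
  unfold Spec_extract_filing_date_py; infer_instance

def pvDiffWitness_extract_filing_date_py : String := "202401ab"
def pvDiffWitnessOut_extract_filing_date_py : String × String := ("2024-01-ab", "Unknown")

-- ===== CLAIM (what is proved, stated in full; the proofs are below) =====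
def Claim_unchanged_extract_filing_date_py : Prop := ∀ (source_document : String), Dom_extract_filing_date_py source_document → Spec_extract_filing_date_py source_document (extract_filing_date_py source_document)
def Claim_changed_extract_filing_date_py : Prop := Dom_extract_filing_date_py (pvDiffWitness_extract_filing_date_py) ∧ D_extract_filing_date_py (pvDiffWitness_extract_filing_date_py) ∧ extract_filing_date_py (pvDiffWitness_extract_filing_date_py) = pvDiffWitnessOut_extract_filing_date_py.1 ∧ extract_filing_date_py_alt (pvDiffWitness_extract_filing_date_py) = pvDiffWitnessOut_extract_filing_date_py.2 ∧ pvDiffWitnessOut_extract_filing_date_py.1 ≠ pvDiffWitnessOut_extract_filing_date_py.2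
def Claim_exact_extract_filing_date_py : Prop := ∀ (source_document : String), Dom_extract_filing_date_py source_document → D_extract_filing_date_py source_document → extract_filing_date_py source_document ≠ extract_filing_date_py_alt source_document

-- ===== LEMMAS AND PROOFS =====

-- named forms of the two per-part tests D_ quantifies over (definitionally equal to its lambda)
def pvAok (p : List Char) : Bool :=
  decide (p.take 2 = ['2', '0'] ∧ 8 ≤ p.length) && (p.take 6).all PySem.Chars.isdigit
def pvBok (p : List Char) : Bool :=
  decide (p.take 2 = ['2', '0'] ∧ 8 ≤ p.length) && (p.take 8).all PySem.Chars.isdigit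

theorem pvD_iff (s : String) : D_extract_filing_date_py s ↔
    (s.toList.splitOn '_').find? pvAok ≠ (s.toList.splitOn '_').find? pvBok := Iff.rfl

-- reference split on '_' (same list str.split('_') produces)
def pvConsHead (pre : List Char) : List (List Char) → List (List Char)
  | [] => [pre]
  | p :: ps => (pre ++ p) :: ps

def pvSplit : List Char → List (List Char)
  | [] => [[]]
  | c :: rest => if c = '_' then [] :: pvSplit rest else pvConsHead [c] (pvSplit rest)


theorem pvSplit_ne_nil (cs : List Char) : pvSplit cs ≠ [] := by
  cases cs with
  | nil => simp [pvSplit]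
  | cons c rest => simp only [pvSplit]; split_ifs <;> (cases h : pvSplit rest <;> simp [pvConsHead])

theorem pvConsHead_nil {xs : List (List Char)} (h : xs ≠ []) : pvConsHead [] xs = xs := by
  cases xs with
  | nil => exact absurd rfl h
  | cons p ps => simp [pvConsHead]

theorem pvConsHead_append (a b : List Char) (xs : List (List Char)) :
    pvConsHead (a ++ b) xs = pvConsHead a (pvConsHead b xs) := by
  cases xs <;> simp [pvConsHead]

theorem pvGo_spec : ∀ (fuel : Nat) (l cur : List Char) (acc : List (List Char)),
    l.length < fuel →
    PySem.Chars.splitOn.go ['_'] fuel l cur acc = acc.reverse ++ pvConsHead cur.reverse (pvSplit l) := by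
  intro fuel
  induction fuel with
  | zero => intro l cur acc h; omega
  | succ n ih =>
    intro l cur acc h
    cases l with
    | nil =>
      simp [PySem.Chars.splitOn.go, pvSplit, pvConsHead]
    | cons c rest =>
      by_cases hc : c = '_'
      · subst hc
        have hpre : (['_'].isPrefixOf ('_' :: rest)) = true := by simp [List.isPrefixOf]
        simp only [PySem.Chars.splitOn.go, hpre, if_true, List.length_cons, List.drop_succ_cons]
        simp only [List.length_nil, List.drop_zero]
        rw [ih rest [] ((cur.reverse) :: acc) (by simpa using Nat.lt_of_succ_lt_succ h)]
        simp only [List.reverse_nil]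
        rw [pvConsHead_nil (pvSplit_ne_nil rest)]
        simp [pvSplit, pvConsHead]
      · have hpre : (['_'].isPrefixOf (c :: rest)) = false := by
          simp [List.isPrefixOf]; exact fun hh => absurd hh.symm hc
        simp only [PySem.Chars.splitOn.go, hpre]
        rw [if_neg (by simp [hpre])] -- branch on the non-'_' character
        rw [ih rest (c :: cur) acc (by simpa using Nat.lt_of_succ_lt_succ h)]
        simp only [pvSplit, if_neg hc, List.reverse_cons]
        rw [pvConsHead_append]

theorem pvSplitOn_eq (cs : List Char) : PySem.Chars.splitOn cs ['_'] = pvSplit cs := by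
  unfold PySem.Chars.splitOn
  rw [pvGo_spec (cs.length + 1) cs [] [] (by omega)]
  simp [pvConsHead_nil (pvSplit_ne_nil cs)]

theorem pvSplit_eq_splitOn (l : List Char) : l.splitOn '_' = pvSplit l := by
  induction l with
  | nil => simp [pvSplit, List.splitOn, List.splitOnP_nil]
  | cons c rest ih =>
    simp only [List.splitOn] at ih ⊢
    rw [List.splitOnP_cons]
    by_cases hc : c = '_'
    · subst hc
      rw [if_pos (by simp)]
      rw [ih]
      rfl
    · rw [if_neg (by simp [hc]), ih]
      simp only [pvSplit, if_neg hc]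
      cases h : pvSplit rest with
      | nil => exact absurd h (pvSplit_ne_nil rest)
      | cons p ps => simp [pvConsHead, List.modifyHead]

theorem pvSplit_no (cs : List Char) (h : '_' ∉ cs) : pvSplit cs = [cs] := by
  induction cs with
  | nil => rfl
  | cons c rest ih =>
    have hc : c ≠ '_' := fun hh => h (hh ▸ List.mem_cons_self)
    have hr : '_' ∉ rest := fun hh => h (List.mem_cons_of_mem _ hh)
    simp [pvSplit, hc, ih hr, pvConsHead]

theorem pvSplit_break (seg t : List Char) (h : '_' ∉ seg) :
    pvSplit (seg ++ '_' :: t) = seg :: pvSplit t := by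
  induction seg with
  | nil => simp [pvSplit]
  | cons c s' ih =>
    have hc : c ≠ '_' := fun hh => h (hh ▸ List.mem_cons_self)
    have hs : '_' ∉ s' := fun hh => h (List.mem_cons_of_mem _ hh)
    simp [pvSplit, hc, ih hs, pvConsHead]

-- ----- A's loop characterised by find? pvAok -----

theorem pvALoop_cons (p : List Char) (rest : List (List Char)) :
    pvALoop (p :: rest) = if pvAok p = true then pvFmt (p.take 8) else pvALoop rest := by
  rcases p with _ | ⟨a0, _ | ⟨a1, _ | ⟨a2, _ | ⟨a3, _ | ⟨a4, _ | ⟨a5, _ | ⟨a6, _ | ⟨a7, tl⟩⟩⟩⟩⟩⟩⟩⟩ <;>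
    try (simp [pvALoop, pvAok]; done)
  have e6 : PySem.List.slice (a0::a1::a2::a3::a4::a5::a6::a7::tl) none (some 6) = [a0,a1,a2,a3,a4,a5] := by
    rw [PySem.List.slice_to (b := 6) _ (by norm_num)]; rfl
  have e8 : PySem.List.slice (a0::a1::a2::a3::a4::a5::a6::a7::tl) none (some 8) = [a0,a1,a2,a3,a4,a5,a6,a7] := by
    rw [PySem.List.slice_to (b := 8) _ (by norm_num)]; rfl
  simp [pvALoop, pvAok, List.take, e6, e8, PySem.Chars.strIsdigit, PySem.Chars.startswith,
    List.isPrefixOf]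
  split_ifs <;> first | rfl | tauto
theorem pvALoop_find (l : List (List Char)) :
    pvALoop l = match l.find? pvAok with | some p => pvFmt (p.take 8) | none => "Unknown" := by
  induction l with
  | nil => rfl
  | cons p rest ih =>
    rw [pvALoop_cons]
    by_cases h : pvAok p = true
    · simp [h, List.find?_cons_of_pos h]
    · simp only [if_neg h, ih, List.find?_cons_of_neg (by simpa using h)]

-- ----- B's scan characterised by find? pvBok -----

theorem pvMatch8_short (cs : List Char) (h : cs.length < 8) : pvMatch8 cs = none := by
  rcases cs with _ | ⟨a0, _ | ⟨a1, _ | ⟨a2, _ | ⟨a3, _ | ⟨a4, _ | ⟨a5, _ | ⟨a6, _ | ⟨a7, tl⟩⟩⟩⟩⟩⟩⟩⟩ <;>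
    simp_all [pvMatch8] <;> omega

theorem pvMatch8_underscore (cs : List Char) (k : Nat) (hk : k < 8) (h : cs[k]? = some '_') :
    pvMatch8 cs = none := by
  rcases cs with _ | ⟨a0, _ | ⟨a1, _ | ⟨a2, _ | ⟨a3, _ | ⟨a4, _ | ⟨a5, _ | ⟨a6, _ | ⟨a7, tl⟩⟩⟩⟩⟩⟩⟩⟩ <;>
    simp_all [pvMatch8] <;> interval_cases k <;>
    simp_all [PySem.Chars.isdigit]

theorem pvMatch8_boundary (seg r : List Char) (hseg : '_' ∉ seg)
    (hr : r = [] ∨ ∃ t, r = '_' :: t) :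
    pvMatch8 (seg ++ r) = if pvBok seg = true then some (pvFmt (seg.take 8)) else none := by
  by_cases hlen : 8 ≤ seg.length
  · rcases seg with _ | ⟨a0, _ | ⟨a1, _ | ⟨a2, _ | ⟨a3, _ | ⟨a4, _ | ⟨a5, _ | ⟨a6, _ | ⟨a7, tl⟩⟩⟩⟩⟩⟩⟩⟩ <;>
      try ((simp at hlen); done)
    have hd2 : PySem.Chars.isdigit '2' = true := by decide
    have hd0 : PySem.Chars.isdigit '0' = true := by decide
    simp [pvMatch8, pvBok, List.take, pvFmt]
    split_ifs <;> first | rfl | tauto | (exfalso; simp_all [PySem.Chars.isdigit])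
  · have hB : pvBok seg = false := by
      simp [pvBok]; intro _ h; omega
    rw [if_neg (by simp [hB])]
    rcases hr with rfl | ⟨t, rfl⟩
    · rw [List.append_nil]; exact pvMatch8_short seg (by omega)
    · exact pvMatch8_underscore _ seg.length (by omega)
        (by rw [List.getElem?_append_right (le_refl _)]; simp)

theorem pvScan_no (cs : List Char) (h : '_' ∉ cs) : pvScan cs = none := by
  induction cs with
  | nil => rfl
  | cons c rest ih =>
    have hc : c ≠ '_' := fun hh => h (hh ▸ List.mem_cons_self)
    have hr : '_' ∉ rest := fun hh => h (List.mem_cons_of_mem _ hh)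
    simp [pvScan, hc, ih hr]

theorem pvScan_break (seg t : List Char) (h : '_' ∉ seg) :
    pvScan (seg ++ '_' :: t) =
      match pvMatch8 t with | some r => some r | none => pvScan t := by
  induction seg with
  | nil => simp [pvScan]
  | cons c s' ih =>
    have hc : c ≠ '_' := fun hh => h (hh ▸ List.mem_cons_self)
    have hs : '_' ∉ s' := fun hh => h (List.mem_cons_of_mem _ hh)
    simp [pvScan, hc, ih hs]

theorem pvDecomp (cs : List Char) :
    '_' ∉ cs ∨ ∃ seg t, cs = seg ++ '_' :: t ∧ '_' ∉ seg := by
  induction cs with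
  | nil => left; simp
  | cons c rest ih =>
    by_cases hc : c = '_'
    · right; exact ⟨[], rest, by simp [hc], by simp⟩
    · rcases ih with h | ⟨seg, t, rfl, hseg⟩
      · left
        intro hh
        rcases List.mem_cons.mp hh with hh | hh
        · exact hc hh.symm
        · exact h hh
      · right
        refine ⟨c :: seg, t, rfl, ?_⟩
        intro hh
        rcases List.mem_cons.mp hh with hh | hh
        · exact hc hh.symm
        · exact hseg hh

theorem pvAlt_find : ∀ (n : Nat) (cs : List Char), cs.length ≤ n →
    (match pvMatch8 cs with
     | some r => r
     | none => match pvScan cs with | some r => r | none => "Unknown") =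
    (match (pvSplit cs).find? pvBok with | some p => pvFmt (p.take 8) | none => "Unknown") := by
  intro n
  induction n with
  | zero =>
    intro cs h
    have : cs = [] := List.eq_nil_of_length_eq_zero (Nat.le_zero.mp h)
    subst this
    simp [pvSplit, pvMatch8, pvScan, List.find?, pvBok]
  | succ n ih =>
    intro cs h
    rcases pvDecomp cs with hno | ⟨seg, t, rfl, hseg⟩
    · have hb := pvMatch8_boundary cs [] hno (Or.inl rfl)
      rw [List.append_nil] at hb
      rw [hb, pvScan_no cs hno, pvSplit_no cs hno]
      by_cases hB : pvBok cs = true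
      · simp [hB, List.find?_cons_of_pos hB]
      · simp [hB, List.find?]
    · have ht : t.length ≤ n := by
        have := h; simp [List.length_append] at this; omega
      rw [pvMatch8_boundary seg ('_' :: t) hseg (Or.inr ⟨t, rfl⟩),
          pvScan_break seg t hseg, pvSplit_break seg t hseg]
      by_cases hB : pvBok seg = true
      · simp [hB, List.find?_cons_of_pos hB]
      · rw [if_neg hB, List.find?_cons_of_neg (by simpa using hB), ← ih t ht]
        cases pvMatch8 t <;> rfl

-- ----- find? transfer lemmas -----

theorem pvBok_imp (p : List Char) (h : pvBok p = true) : pvAok p = true := by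
  simp only [pvBok, pvAok, Bool.and_eq_true] at h ⊢
  refine ⟨h.1, ?_⟩
  have h8 := h.2
  have ht : p.take 6 = (p.take 8).take 6 := by simp [List.take_take]
  rw [ht]
  exact List.all_eq_true.mpr fun x hx => List.all_eq_true.mp h8 x (List.mem_of_mem_take hx)

theorem pvFindB_of_none (l : List (List Char)) (h : l.find? pvAok = none) :
    l.find? pvBok = none := by
  induction l with
  | nil => rfl
  | cons p rest ih =>
    rw [List.find?] at h ⊢
    cases hA : pvAok p with
    | true => rw [hA] at h; simp at h
    | false =>
      rw [hA] at h
      have hB : pvBok p = false := by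
        cases hb : pvBok p
        · rfl
        · exact absurd (pvBok_imp p hb) (by simp [hA])
      rw [hB]
      exact ih h

theorem pvFindB_of_some (l : List (List Char)) (p : List Char)
    (h : l.find? pvAok = some p) (hb : pvBok p = true) : l.find? pvBok = some p := by
  induction l with
  | nil => simp at h
  | cons q rest ih =>
    rw [List.find?] at h ⊢
    cases hA : pvAok q with
    | true =>
      rw [hA] at h
      simp at h
      subst h
      rw [hb]
    | false =>
      rw [hA] at h
      have hB : pvBok q = false := by
        cases hq : pvBok q
        · rfl
        · exact absurd (pvBok_imp q hq) (by simp [hA])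
      rw [hB]
      exact ih h

theorem pvTake8 (a0 a1 a2 a3 a4 a5 a6 a7 : Char) (tl : List Char) :
    pvFmt ((a0::a1::a2::a3::a4::a5::a6::a7::tl).take 8) =
      String.mk [a0, a1, a2, a3, '-', a4, a5, '-', a6, a7] := rfl


-- ===== VERDICT (by name: the statements are the Claim_ definitions above) =====

theorem extract_filing_date_py_spec : Claim_unchanged_extract_filing_date_py := by
  intro s _ hD
  show extract_filing_date_py s = extract_filing_date_py_alt s
  unfold extract_filing_date_py extract_filing_date_py_alt
  rw [pvSplitOn_eq, pvALoop_find, pvAlt_find s.toList.length s.toList (le_refl _)]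
  have hEq : (pvSplit s.toList).find? pvAok = (pvSplit s.toList).find? pvBok := by
    by_contra hne
    exact hD ((pvD_iff s).mpr (by rw [pvSplit_eq_splitOn]; exact hne))
  rw [hEq]

theorem extract_filing_date_py_changed : Claim_changed_extract_filing_date_py := by
  unfold Claim_changed_extract_filing_date_py; decide

theorem extract_filing_date_py_tight : Claim_exact_extract_filing_date_py := by
  intro s _ hD
  rw [pvD_iff, pvSplit_eq_splitOn] at hD
  show extract_filing_date_py s ≠ extract_filing_date_py_alt s
  unfold extract_filing_date_py extract_filing_date_py_alt
  rw [pvSplitOn_eq, pvALoop_find, pvAlt_find s.toList.length s.toList (le_refl _)]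
  cases hF : (pvSplit s.toList).find? pvAok with
  | none => rw [hF, pvFindB_of_none _ hF] at hD; exact absurd rfl hD
  | some p =>
    have hap : pvAok p = true := List.find?_some hF
    have hbp : pvBok p = false := by
      cases hb : pvBok p
      · rfl
      · rw [hF, pvFindB_of_some _ p hF hb] at hD; exact absurd rfl hD
    have hlen : 8 ≤ p.length := by
      have h' := hap; simp only [pvAok, Bool.and_eq_true, decide_eq_true_eq] at h'
      exact h'.1.2
    rcases p with _ | ⟨a0, _ | ⟨a1, _ | ⟨a2, _ | ⟨a3, _ | ⟨a4, _ | ⟨a5, _ | ⟨a6, _ | ⟨a7, tl⟩⟩⟩⟩⟩⟩⟩⟩ <;>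
      try ((simp at hlen); done)
    have hnd' : PySem.Chars.isdigit a6 = false ∨ PySem.Chars.isdigit a7 = false := by
      have h1 := hap
      have h2 := hbp
      simp only [pvAok, pvBok, List.take, Bool.and_eq_true, Bool.and_eq_false_iff,
        List.all_cons, List.all_nil, Bool.and_true, decide_eq_true_eq, decide_eq_false_iff_not] at h1 h2
      rcases h2 with h2 | h2
      · exact absurd h1.1 h2
      · rcases h1 with ⟨-, hd⟩
        by_cases h6 : PySem.Chars.isdigit a6 = true
        · right
          by_cases h7 : PySem.Chars.isdigit a7 = true
          · exfalso
            simp [hd.1, hd.2.1, hd.2.2.1, hd.2.2.2.1, hd.2.2.2.2.1, hd.2.2.2.2.2, h6, h7] at h2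
          · simpa using h7
        · left; simpa using h6
    cases hG : (pvSplit s.toList).find? pvBok with
    | none =>
      show pvFmt ((a0::a1::a2::a3::a4::a5::a6::a7::tl).take 8) ≠ "Unknown"
      rw [pvTake8]
      intro h
      have hl := congrArg String.length h
      rw [show String.mk = String.ofList from rfl, String.length_ofList] at hl
      rw [show ("Unknown" : String).length = 7 from rfl] at hl
      simp at hl
    | some q =>
      have hbq : pvBok q = true := List.find?_some hG
      have hlq : 8 ≤ q.length := by
        have h' := pvBok_imp q hbq
        simp only [pvAok, Bool.and_eq_true, decide_eq_true_eq] at h'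
        exact h'.1.2
      have hdq : (q.take 8).all PySem.Chars.isdigit = true := by
        rw [pvBok, Bool.and_eq_true] at hbq; exact hbq.2
      rcases q with _ | ⟨b0, _ | ⟨b1, _ | ⟨b2, _ | ⟨b3, _ | ⟨b4, _ | ⟨b5, _ | ⟨b6, _ | ⟨b7, tq⟩⟩⟩⟩⟩⟩⟩⟩ <;>
        try ((simp at hlq); done)
      show pvFmt ((a0::a1::a2::a3::a4::a5::a6::a7::tl).take 8) ≠
        pvFmt ((b0::b1::b2::b3::b4::b5::b6::b7::tq).take 8)
      rw [pvTake8, pvTake8]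
      intro h
      have hl := String.ofList_inj.mp h
      simp only [List.cons.injEq, and_true, true_and] at hl
      obtain ⟨-, -, -, -, -, -, h6, h7⟩ := hl
      simp only [List.take, List.all_cons, List.all_nil, Bool.and_true,
        Bool.and_eq_true] at hdq
      rcases hnd' with hc | hc
      · rw [h6] at hc; rw [hc] at hdq; simp at hdq
      · rw [h7] at hc; rw [hc] at hdq; simp at hdq
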